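-- pv_equiv track=rewrite | github.com/gabriel-francischini/python-fatec-1st-semester-exercise-lists | invasao/utilidades.py | number_list_from_string
-- ===== SOURCE A (Python) =====
-- def number_list_from_string(texto):
--     """Transforma uma sequência de caracteres (entrada) em uma lista de números.
--
--     Qualquer caractere que não seja um dígito é usado como marcador para separar os números.
--
--     Args:
--         entrada (str): Uma sequência/lista de caracteres contendo números.
--     Retorna:
--         Uma lista de números.
--     """
--
--     lista_de_numeros = []
--     numero_atual = ''
--     for char in texto:
--         if char.isdigit():
--             numero_atual += char
--         else:
--             if numero_atual != '':
--                 lista_de_numeros.append(int(numero_atual))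
--                 numero_atual = ''
--
--     # Adiciona o último número que ficou sobrando do loop anterior
--     if numero_atual != '':
--         lista_de_numeros.append(int(numero_atual))
--
--     return lista_de_numeros
-- ===== SOURCE B (Python) =====
-- def number_list_from_string(texto):
--     """Transforma uma sequência de caracteres (entrada) em uma lista de números.
--
--     Qualquer caractere que não seja um dígito é usado como marcador para separar os números.
--     """
--     resultado = []
--     i, n = 0, len(texto)
--     while i < n:
--         if texto[i].isdigit():
--             j = i
--             while j < n and texto[j].isdigit():
--                 j += 1
--             resultado.append(int(texto[i:j]))
--             i = j
--         else:
--             i += 1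
--     return resultado
-- ===== Notes on version B (the rewrite author's own statement) =====
-- stated objective: alternative
-- what changed: Replaces the per-character accumulator string with trailing-flush branch by an index-based scan that extracts each maximal digit run with an inner loop and converts the whole run slice at once.
import Mathlib
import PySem

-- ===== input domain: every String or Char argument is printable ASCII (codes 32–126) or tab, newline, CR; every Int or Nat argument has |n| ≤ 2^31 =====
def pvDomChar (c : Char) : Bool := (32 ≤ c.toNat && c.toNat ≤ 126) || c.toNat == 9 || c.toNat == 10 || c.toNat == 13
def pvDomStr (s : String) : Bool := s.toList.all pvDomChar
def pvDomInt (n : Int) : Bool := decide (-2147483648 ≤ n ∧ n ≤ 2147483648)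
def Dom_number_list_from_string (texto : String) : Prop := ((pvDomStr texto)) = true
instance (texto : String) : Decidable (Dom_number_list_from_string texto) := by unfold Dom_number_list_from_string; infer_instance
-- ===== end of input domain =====

-- B replaces A's per-character accumulator + trailing flush with an index-free run scan
-- (extract each maximal digit run, convert it at once); alternative decomposition, same cost.

-- ===== PORT A =====
-- loop body of A: state = (lista_de_numeros, numero_atual as its character list)
def nlfsStep (st : List Int × List Char) (c : Char) : List Int × List Char :=
  if PySem.Chars.isdigit c then (st.1, st.2 ++ [c])
  else if st.2 ≠ [] then (st.1 ++ [(PySem.Int.ofChars? st.2).getD 0], []) else st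

def number_list_from_string (texto : String) : List Int :=
  let st := texto.toList.foldl nlfsStep ([], [])
  if st.2 ≠ [] then st.1 ++ [(PySem.Int.ofChars? st.2).getD 0] else st.1

-- ===== PORT B =====
-- B's outer while loop: skip a non-digit, or take the maximal digit run (the inner
-- while-loop scan = takeWhile), convert it, and continue after it (dropWhile).
def nlfsRuns : List Char → List Int
  | [] => []
  | c :: cs =>
    if PySem.Chars.isdigit c then
      (PySem.Int.ofChars? (c :: cs.takeWhile PySem.Chars.isdigit)).getD 0 ::
        nlfsRuns (cs.dropWhile PySem.Chars.isdigit)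
    else nlfsRuns cs
termination_by l => l.length
decreasing_by
  · have := List.length_dropWhile_le (p := PySem.Chars.isdigit) (l := cs)
    simp; omega
  · simp

def number_list_from_string_alt (texto : String) : List Int :=
  nlfsRuns texto.toList

-- ===== PRECONDITION & SPEC =====
def Spec_number_list_from_string (texto : String) (out : List Int) : Prop := out = number_list_from_string_alt texto
instance (texto : String) (out : List Int) : Decidable (Spec_number_list_from_string texto out) := by unfold Spec_number_list_from_string; infer_instance

-- ===== CLAIM (what is proved, stated in full; the proofs are below) =====
def Claim_equal_number_list_from_string : Prop := ∀ (texto : String), Dom_number_list_from_string texto → Spec_number_list_from_string texto (number_list_from_string texto)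

-- ===== LEMMAS AND PROOFS =====

-- final flush of A's loop state
def nlfsFlush (st : List Int × List Char) : List Int :=
  if st.2 ≠ [] then st.1 ++ [(PySem.Int.ofChars? st.2).getD 0] else st.1

-- Main invariant, both loop-state cases at once:
-- from an empty accumulator A's loop produces exactly B's runs; from a nonempty
-- accumulator it first finishes the current run (cur ++ leading digits of l).
theorem nlfs_invariant (l : List Char) :
    (∀ acc : List Int, nlfsFlush (l.foldl nlfsStep (acc, [])) = acc ++ nlfsRuns l) ∧
    (∀ (acc : List Int) (cur : List Char), cur ≠ [] →
      nlfsFlush (l.foldl nlfsStep (acc, cur)) =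
        acc ++ (PySem.Int.ofChars? (cur ++ l.takeWhile PySem.Chars.isdigit)).getD 0 ::
          nlfsRuns (l.dropWhile PySem.Chars.isdigit)) := by
  induction l with
  | nil =>
    constructor
    · intro acc; simp [nlfsFlush, nlfsRuns]
    · intro acc cur hcur; simp [nlfsFlush, hcur, nlfsRuns]
  | cons c cs ih =>
    obtain ⟨ihA, ihB⟩ := ih
    constructor
    · intro acc
      by_cases hd : PySem.Chars.isdigit c
      · have := ihB acc [c] (by simp)
        simp only [List.foldl_cons, nlfsStep, hd, if_pos, List.nil_append] at this ⊢
        rw [this]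
        simp [nlfsRuns, hd]
      · simp only [List.foldl_cons, nlfsStep, hd, if_neg, Bool.false_eq_true,
          not_false_iff, ne_eq, not_true_eq_false]
        rw [ihA acc]
        simp [nlfsRuns, hd]
    · intro acc cur hcur
      by_cases hd : PySem.Chars.isdigit c
      · have := ihB acc (cur ++ [c]) (by simp)
        simp only [List.foldl_cons, nlfsStep, hd, if_pos] at this ⊢
        rw [this]
        simp [hd]
      · simp only [List.foldl_cons, nlfsStep, hd, Bool.false_eq_true, if_false, hcur,
          ne_eq, not_false_iff, if_pos, if_true]
        rw [ihA]
        simp [hd, nlfsRuns]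

-- ===== VERDICT (by name: the statement is the Claim_ definition above) =====
theorem number_list_from_string_spec : Claim_equal_number_list_from_string := by
  intro texto _
  unfold Spec_number_list_from_string number_list_from_string number_list_from_string_alt
  have h := (nlfs_invariant texto.toList).1 []
  simpa [nlfsFlush] using h
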